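-- pv_equiv track=rewrite | github.com/revathipriyan/Data-Structures-and-Algorithm | Data-Structures-and-Algorithm/GRAPH/safe-states.py | safeState
-- ===== SOURCE A (Python) =====
-- def safeState(graph):
--     n = len(graph)
--     safe = {}
--
--     def dfs(i):
--         if i in safe:
--             return safe[i]
--         safe[i] = False
--         for nei in graph[i]:
--             if not dfs(nei):
--                 return False
--         safe[i] = True
--         return True
--
--     res= []
--     for i in range(n):
--         if dfs(i):
--             res.append(i)
--
--     return res
-- ===== SOURCE B (Python) =====
-- def safeState(graph):
--     # Fixed-point iteration instead of memoized DFS: repeatedly mark a node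
--     # safe once all of its neighbours are marked safe, until a pass changes
--     # nothing (at most n passes).
--     n = len(graph)
--     safe = [False] * n
--     for _ in range(n):
--         changed = False
--         for i in range(n):
--             if not safe[i] and all(safe[nei] for nei in graph[i]):
--                 safe[i] = True
--                 changed = True
--         if not changed:
--             break
--     return [i for i in range(n) if safe[i]]
-- ===== Notes on version B (the rewrite author's own statement) =====
-- stated objective: alternative
-- what changed: Replaced the recursive memoized DFS (gray/black colouring via a dict) by a bottom-up fixed-point iteration: repeatedly mark a node safe once all its neighbours are safe, until a pass changes nothing; the ascending result list falls out of the final boolean array.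
import Mathlib
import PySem

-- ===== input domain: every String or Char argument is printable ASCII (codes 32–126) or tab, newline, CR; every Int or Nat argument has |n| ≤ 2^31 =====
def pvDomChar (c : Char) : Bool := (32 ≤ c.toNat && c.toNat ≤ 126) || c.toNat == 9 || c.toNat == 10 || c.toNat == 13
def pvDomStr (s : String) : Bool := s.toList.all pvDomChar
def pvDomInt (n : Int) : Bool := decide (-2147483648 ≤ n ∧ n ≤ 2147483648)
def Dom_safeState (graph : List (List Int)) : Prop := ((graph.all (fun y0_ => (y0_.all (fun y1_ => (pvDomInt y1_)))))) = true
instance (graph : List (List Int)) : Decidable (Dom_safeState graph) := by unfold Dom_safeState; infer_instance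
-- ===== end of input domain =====

-- B replaces A's recursive memoized DFS by a bottom-up fixed-point iteration (mark a node
-- safe once all its neighbours are safe, until a pass changes nothing); same return value.

-- ===== PORT A =====
-- A's inner `dfs` recurses through the graph and terminates only thanks to the memo dict;
-- it is ported with a fuel parameter (2*n+1 ≥ one unit per possible memo key plus one), with
-- `none` signalling fuel exhaustion or the IndexError `graph[nei]` (wherever Python A returns,
-- neither occurs and the port computes the same scan step for step).
mutual
def dfsA (graph : List (List Int)) : Nat → Int → PySem.Dict Int Bool → Option (Bool × PySem.Dict Int Bool)
  | 0, _, _ => none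
  | fuel+1, i, m =>
    match PySem.Dict.get? m i with
    | some b => some (b, m)                      -- `if i in safe: return safe[i]`
    | none =>
      let m1 := PySem.Dict.insert m i false      -- `safe[i] = False`
      match PySem.List.pyGet? graph i with
      | none => none                             -- IndexError (outside Pre_)
      | some row => dfsALoop graph fuel i row m1
termination_by fuel _ _ => (fuel, 0)
def dfsALoop (graph : List (List Int)) : Nat → Int → List Int → PySem.Dict Int Bool → Option (Bool × PySem.Dict Int Bool)
  | _, i, [], m => some (true, PySem.Dict.insert m i true)  -- `safe[i] = True; return True`
  | fuel, i, nei :: rest, m =>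
    match dfsA graph fuel nei m with
    | none => none
    | some (b, m') => if b then dfsALoop graph fuel i rest m' else some (false, m')
termination_by fuel _ row _ => (fuel, row.length + 1)
end

-- one iteration of A's top-level `for i in range(n): if dfs(i): res.append(i)`
def stepA (graph : List (List Int)) (st : PySem.Dict Int Bool × List Int) (i : Int) :
    PySem.Dict Int Bool × List Int :=
  match dfsA graph (2 * graph.length + 1) i st.1 with
  | none => st                                   -- unreachable under Pre_
  | some (b, m') => (m', if b then st.2 ++ [i] else st.2)

def safeState (graph : List (List Int)) : List Int :=
  ((PySem.List.pyRange 0 (graph.length : Int) 1).foldl (stepA graph) (PySem.Dict.empty, [])).2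

-- ===== PORT B =====
-- body of B's pass: `if not safe[i] and all(safe[nei] for nei in graph[i]): safe[i]=True; changed=True`
def stepB (graph : List (List Int)) (st : List Bool × Bool) (i : Int) : List Bool × Bool :=
  if !(PySem.List.pyGetD st.1 i false)
      && (PySem.List.pyGetD graph i []).all (fun nei => PySem.List.pyGetD st.1 nei false)
  then (PySem.List.pySetD st.1 i true, true)
  else st

def passB (graph : List (List Int)) (safe : List Bool) : List Bool × Bool :=
  (PySem.List.pyRange 0 (graph.length : Int) 1).foldl (stepB graph) (safe, false)

-- `for _ in range(n): ... if not changed: break`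
def passesB (graph : List (List Int)) : Nat → List Bool → List Bool
  | 0, safe => safe
  | k+1, safe =>
    let st := passB graph safe
    if st.2 then passesB graph k st.1 else st.1

def safeState_alt (graph : List (List Int)) : List Int :=
  let n := graph.length
  let final := passesB graph n (List.replicate n false)
  (PySem.List.pyRange 0 (n : Int) 1).filter (fun i => PySem.List.pyGetD final i false)

-- ===== PRECONDITION & SPEC =====
-- decidable safety (bounded least-fixpoint approximant: a node is safe at stage k+1 when all
-- its neighbours are safe at stage k; stage n+1 is the fixpoint, cf. `fstar_char` below)
def safeB (graph : List (List Int)) : Nat → Int → Bool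
  | 0, _ => false
  | k+1, i =>
    match PySem.List.pyGet? graph i with
    | none => false
    | some row => row.all (fun j => safeB graph k j)

-- Pre_ is EXACTLY the inputs on which Python A returns normally: A's dfs scans each row
-- left to right and stops at the first unsafe neighbour, so it raises IndexError precisely
-- when some row has an out-of-range entry NOT preceded by an unsafe entry.
def Pre_safeState (graph : List (List Int)) : Prop :=
  ∀ i ∈ PySem.List.pyRange 0 (graph.length : Int) 1,
    ∀ k : Nat, k < (PySem.List.pyGetD graph i ([] : List Int)).length →
      ((PySem.List.pyGetD graph i ([] : List Int)).getD k 0 < -(graph.length : Int) ∨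
        (graph.length : Int) ≤ (PySem.List.pyGetD graph i ([] : List Int)).getD k 0) →
      ∃ j : Nat, j < k ∧
        safeB graph (graph.length + 1) ((PySem.List.pyGetD graph i ([] : List Int)).getD j 0) = false
instance (graph : List (List Int)) : Decidable (Pre_safeState graph) := by unfold Pre_safeState; infer_instance
def pvWitness_safeState : List (List Int) := [[1], [0, 2], []]

def Spec_safeState (graph : List (List Int)) (out : List Int) : Prop := out = safeState_alt graph
instance (graph : List (List Int)) (out : List Int) : Decidable (Spec_safeState graph out) := by unfold Spec_safeState; infer_instance

-- ===== CLAIM (what is proved, stated in full; the proofs are below) =====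
def Claim_equal_safeState : Prop := ∀ (graph : List (List Int)), Dom_safeState graph → Pre_safeState graph → Spec_safeState graph (safeState graph)

-- ===== LEMMAS AND PROOFS =====

-- the mathematical notion both programs compute: a node is safe iff all its neighbours are
-- (least fixpoint; only holds for in-range — possibly negative — indices, since `graph[i]` must exist)
inductive SafeP (graph : List (List Int)) : Int → Prop
  | mk (i : Int) (row : List Int) (h : PySem.List.pyGet? graph i = some row)
      (ih : ∀ j ∈ row, SafeP graph j) : SafeP graph i

def Edge (graph : List (List Int)) (i j : Int) : Prop :=
  ∃ row, PySem.List.pyGet? graph i = some row ∧ j ∈ row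

lemma safeP_iff {graph : List (List Int)} {i : Int} {row : List Int}
    (h : PySem.List.pyGet? graph i = some row) :
    SafeP graph i ↔ ∀ j ∈ row, SafeP graph j := by
  constructor
  · rintro ⟨_, row', h', ih⟩
    rw [h] at h'; cases h'; exact ih
  · exact fun ih => .mk i row h ih

lemma safeP_no_cycle {graph : List (List Int)} {i : Int} (hs : SafeP graph i) :
    ¬ Relation.TransGen (Edge graph) i i := by
  induction hs with
  | mk i row h ih IH =>
    intro hcyc
    obtain ⟨k, hik, hki⟩ := Relation.TransGen.head'_iff.mp hcyc
    obtain ⟨row', h', hkrow⟩ := hik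
    rw [h] at h'; cases h'
    exact IH k hkrow (Relation.TransGen.tail' hki ⟨row, h, hkrow⟩)

-- memo invariants for A's dfs: S is the list of in-progress ("gray") nodes, innermost first
def MLe (m m' : PySem.Dict Int Bool) : Prop :=
  ∀ j b, PySem.Dict.get? m j = some b → PySem.Dict.get? m' j = some b

def InvM (graph : List (List Int)) (m : PySem.Dict Int Bool) (S : List Int) : Prop :=
  ∀ j b, PySem.Dict.get? m j = some b →
    (b = true → SafeP graph j) ∧ (b = false → j ∈ S ∨ ¬ SafeP graph j)

def StackM (m : PySem.Dict Int Bool) (S : List Int) : Prop :=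
  ∀ j ∈ S, PySem.Dict.get? m j = some false

lemma dfsA_sound (graph : List (List Int)) : ∀ fuel : Nat,
    ∀ (i : Int) (m : PySem.Dict Int Bool) (S : List Int) (b : Bool) (m' : PySem.Dict Int Bool),
    (∀ j ∈ S, Relation.ReflTransGen (Edge graph) j i) → InvM graph m S → StackM m S →
    dfsA graph fuel i m = some (b, m') →
    MLe m m' ∧ InvM graph m' S ∧ StackM m' S ∧
      (b = true → SafeP graph i) ∧ (b = false → i ∈ S ∨ ¬ SafeP graph i) := by
  intro fuel
  induction fuel with
  | zero =>
    intro i m S b m' _ _ _ heq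
    rw [dfsA] at heq
    cases heq
  | succ fuel IH =>
    have loop : ∀ (row : List Int) (i : Int) (m : PySem.Dict Int Bool) (S : List Int)
        (b : Bool) (m' : PySem.Dict Int Bool),
        (∀ nei ∈ row, Edge graph i nei) →
        (∀ j ∈ S, Relation.ReflTransGen (Edge graph) j i) →
        InvM graph m (i :: S) → StackM m (i :: S) →
        dfsALoop graph fuel i row m = some (b, m') →
        (b = true → (∀ nei ∈ row, SafeP graph nei) ∧
          ∃ m'', MLe m m'' ∧ InvM graph m'' (i :: S) ∧ StackM m'' (i :: S) ∧
            m' = PySem.Dict.insert m'' i true) ∧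
        (b = false → MLe m m' ∧ InvM graph m' (i :: S) ∧ StackM m' (i :: S) ∧
          ∃ nei ∈ row, (nei ∈ (i :: S) ∨ ¬ SafeP graph nei)) := by
      intro row
      induction row with
      | nil =>
        intro i m S b m' _ _ hInv hStk heq
        rw [dfsALoop] at heq
        simp only [Option.some_inj, Prod.mk.injEq] at heq
        obtain ⟨rfl, rfl⟩ := heq
        refine ⟨fun _ => ⟨(by intro nei h; cases h), m, fun j bj hj => hj, hInv, hStk, rfl⟩,
          fun hcon => by simp at hcon⟩
      | cons nei rest IHr =>
        intro i m S b m' hrow hS hInv hStk heq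
        rw [dfsALoop] at heq
        cases hd : dfsA graph fuel nei m with
        | none => rw [hd] at heq; cases heq
        | some r =>
          obtain ⟨b0, m0⟩ := r
          rw [hd] at heq
          have hS' : ∀ j ∈ i :: S, Relation.ReflTransGen (Edge graph) j nei := by
            intro j hj
            rcases List.mem_cons.mp hj with rfl | hj'
            · exact Relation.ReflTransGen.single (hrow nei List.mem_cons_self)
            · exact (hS j hj').trans (Relation.ReflTransGen.single (hrow nei List.mem_cons_self))
          obtain ⟨hMLe0, hInv0, hStk0, hbt, hbf⟩ := IH nei m (i :: S) b0 m0 hS' hInv hStk hd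
          cases b0 with
          | true =>
            simp only [if_true] at heq
            have hres := IHr i m0 S b m'
              (fun n hn => hrow n (List.mem_cons_of_mem _ hn)) hS hInv0 hStk0 heq
            refine ⟨fun hb => ?_, fun hb => ?_⟩
            · obtain ⟨hall, m'', hMLe2, hInv2, hStk2, hm'⟩ := hres.1 hb
              refine ⟨?_, m'', fun j bj hj => hMLe2 j bj (hMLe0 j bj hj), hInv2, hStk2, hm'⟩
              intro n hn
              rcases List.mem_cons.mp hn with rfl | hn'
              · exact hbt rfl
              · exact hall n hn'
            · obtain ⟨hMLe2, hInv2, hStk2, n, hn, hcase⟩ := hres.2 hb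
              exact ⟨fun j bj hj => hMLe2 j bj (hMLe0 j bj hj), hInv2, hStk2,
                n, List.mem_cons_of_mem _ hn, hcase⟩
          | false =>
            simp only [Bool.false_eq_true, if_false] at heq
            simp only [Option.some_inj, Prod.mk.injEq] at heq
            obtain ⟨rfl, rfl⟩ := heq
            refine ⟨fun hcon => by simp at hcon, fun _ => ?_⟩
            exact ⟨hMLe0, hInv0, hStk0, nei, List.mem_cons_self, hbf rfl⟩
    intro i m S b m' hS hInv hStk heq
    rw [dfsA] at heq
    cases hm : PySem.Dict.get? m i with
    | some bi =>
      rw [hm] at heq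
      simp only [Option.some_inj, Prod.mk.injEq] at heq
      obtain ⟨rfl, rfl⟩ := heq
      exact ⟨fun j bj hj => hj, hInv, hStk, (hInv i bi hm).1, (hInv i bi hm).2⟩
    | none =>
      rw [hm] at heq
      cases hg : PySem.List.pyGet? graph i with
      | none => rw [hg] at heq; cases heq
      | some row =>
        rw [hg] at heq
        simp only [] at heq
        have hiS : i ∉ S := by
          intro hiS
          have := hStk i hiS
          rw [hm] at this
          cases this
        have hInv1 : InvM graph (PySem.Dict.insert m i false) (i :: S) := by
          intro j bj hj
          rw [PySem.Dict.get?_insert] at hj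
          split at hj
          · obtain rfl := Option.some_inj.mp hj
            exact ⟨fun hcon => by simp at hcon, fun _ => Or.inl (by subst_vars; exact List.mem_cons_self)⟩
          · obtain ⟨h1, h2⟩ := hInv j bj hj
            exact ⟨h1, fun hf => (h2 hf).imp_left (List.mem_cons_of_mem _)⟩
        have hStk1 : StackM (PySem.Dict.insert m i false) (i :: S) := by
          intro j hj
          rw [PySem.Dict.get?_insert]
          rcases List.mem_cons.mp hj with rfl | hj'
          · rw [if_pos rfl]
          · rw [if_neg (fun hji => by subst hji; exact hiS hj')]
            exact hStk j hj'
        have hrow : ∀ nei ∈ row, Edge graph i nei := fun nei hn => ⟨row, hg, hn⟩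
        have hMLe1 : MLe m (PySem.Dict.insert m i false) := by
          intro j bj hj
          rw [PySem.Dict.get?_insert]
          rw [if_neg (fun hji => by subst hji; rw [hm] at hj; cases hj)]
          exact hj
        have hl := loop row i (PySem.Dict.insert m i false) S b m' hrow hS hInv1 hStk1 heq
        cases b with
        | true =>
          obtain ⟨hall, m'', hMLe2, hInv2, hStk2, rfl⟩ := hl.1 rfl
          have hsafe : SafeP graph i := .mk i row hg hall
          have hMLe : MLe m (PySem.Dict.insert m'' i true) := by
            intro j bj hj
            rw [PySem.Dict.get?_insert]
            rw [if_neg (fun hji => by subst hji; rw [hm] at hj; cases hj)]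
            exact hMLe2 j bj (hMLe1 j bj hj)
          refine ⟨hMLe, ?_, ?_, fun _ => hsafe, fun hcon => by simp at hcon⟩
          · intro j bj hj
            rw [PySem.Dict.get?_insert] at hj
            split at hj
            · obtain rfl := Option.some_inj.mp hj
              subst_vars
              exact ⟨fun _ => hsafe, fun hcon => by simp at hcon⟩
            · obtain ⟨h1, h2⟩ := hInv2 j bj hj
              refine ⟨h1, fun hf => ?_⟩
              rcases h2 hf with hjm | hns
              · rcases List.mem_cons.mp hjm with rfl | hj'
                · exact absurd rfl (by assumption)
                · exact Or.inl hj'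
              · exact Or.inr hns
          · intro j hj
            rw [PySem.Dict.get?_insert]
            rw [if_neg (fun hji => by subst hji; exact hiS hj)]
            exact hStk2 j (List.mem_cons_of_mem _ hj)
        | false =>
          obtain ⟨hMLe2, hInv2, hStk2, nei, hnr, hne⟩ := hl.2 rfl
          have hnsafe : ¬ SafeP graph i := by
            intro hsi
            have hall := (safeP_iff hg).mp hsi
            rcases hne with hmem | hns
            · have hrs : Relation.ReflTransGen (Edge graph) nei i := by
                rcases List.mem_cons.mp hmem with rfl | hmem'
                · exact Relation.ReflTransGen.refl
                · exact hS nei hmem'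
              exact safeP_no_cycle (hall nei hnr) (Relation.TransGen.tail' hrs (hrow nei hnr))
            · exact hns (hall nei hnr)
          refine ⟨fun j bj hj => hMLe2 j bj (hMLe1 j bj hj), ?_, ?_, fun hcon => by simp at hcon,
            fun _ => Or.inr hnsafe⟩
          · intro j bj hj
            obtain ⟨h1, h2⟩ := hInv2 j bj hj
            refine ⟨h1, fun hf => ?_⟩
            rcases h2 hf with hjm | hns
            · rcases List.mem_cons.mp hjm with rfl | hj'
              · exact Or.inr hnsafe
              · exact Or.inl hj'
            · exact Or.inr hns
          · intro j hj
            exact hStk2 j (List.mem_cons_of_mem _ hj)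

-- fuel sufficiency
def Kset (graph : List (List Int)) : List Int :=
  PySem.List.pyRange (-(graph.length : Int)) (graph.length : Int) 1

def missing (graph : List (List Int)) (m : PySem.Dict Int Bool) : Nat :=
  (Kset graph).countP (fun k => (PySem.Dict.get? m k).isNone)

lemma dfsA_dom_mono (graph : List (List Int)) : ∀ fuel : Nat,
    ∀ (i : Int) (m : PySem.Dict Int Bool) (r : Bool × PySem.Dict Int Bool),
    dfsA graph fuel i m = some r →
    ∀ j, (PySem.Dict.get? m j).isSome → (PySem.Dict.get? r.2 j).isSome := by
  intro fuel
  induction fuel with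
  | zero =>
    intro i m r heq
    rw [dfsA] at heq
    cases heq
  | succ fuel IH =>
    have loop : ∀ (row : List Int) (i : Int) (m : PySem.Dict Int Bool) (r : Bool × PySem.Dict Int Bool),
        dfsALoop graph fuel i row m = some r →
        ∀ j, (PySem.Dict.get? m j).isSome → (PySem.Dict.get? r.2 j).isSome := by
      intro row
      induction row with
      | nil =>
        intro i m r heq j hj
        rw [dfsALoop] at heq
        obtain rfl := (Option.some_inj.mp heq)
        show (PySem.Dict.get? (PySem.Dict.insert m i true) j).isSome
        rw [PySem.Dict.get?_insert]
        split
        · rfl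
        · exact hj
      | cons nei rest IHr =>
        intro i m r heq j hj
        rw [dfsALoop] at heq
        cases hd : dfsA graph fuel nei m with
        | none => rw [hd] at heq; cases heq
        | some r0 =>
          obtain ⟨b0, m0⟩ := r0
          rw [hd] at heq
          have h0 := IH nei m (b0, m0) hd j hj
          cases b0 with
          | true =>
            simp only [if_true] at heq
            exact IHr i m0 r heq j h0
          | false =>
            simp only [Bool.false_eq_true, if_false] at heq
            obtain rfl := (Option.some_inj.mp heq)
            exact h0
    intro i m r heq j hj
    rw [dfsA] at heq
    cases hm : PySem.Dict.get? m i with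
    | some bi =>
      rw [hm] at heq
      obtain rfl := (Option.some_inj.mp heq)
      exact hj
    | none =>
      rw [hm] at heq
      cases hg : PySem.List.pyGet? graph i with
      | none => rw [hg] at heq; cases heq
      | some row =>
        rw [hg] at heq
        have hj1 : (PySem.Dict.get? (PySem.Dict.insert m i false) j).isSome := by
          rw [PySem.Dict.get?_insert]
          split
          · rfl
          · exact hj
        exact loop row i (PySem.Dict.insert m i false) r heq j hj1

lemma countP_lt_of {l : List Int} {p q : Int → Bool} (h : ∀ a ∈ l, p a = true → q a = true)
    {a0 : Int} (ha : a0 ∈ l) (h1 : ¬ p a0 = true) (h2 : q a0 = true) :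
    l.countP p < l.countP q := by
  induction l with
  | nil => cases ha
  | cons a l IH =>
    rcases List.mem_cons.mp ha with rfl | ha'
    · have hle : l.countP p ≤ l.countP q :=
        List.countP_mono_left (fun x hx => h x (List.mem_cons_of_mem _ hx))
      simp only [List.countP_cons, h1, h2]
      simp only [Bool.not_eq_true] at h1
      simp only [Bool.false_eq_true, if_false, if_true]
      omega
    · have hlt : l.countP p < l.countP q :=
        IH (fun x hx => h x (List.mem_cons_of_mem _ hx)) ha'
      simp only [List.countP_cons]
      by_cases hpa : p a = true
      · have := h a (List.mem_cons_self) hpa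
        simp [hpa, this]; omega
      · simp only [Bool.not_eq_true] at hpa
        simp [hpa]
        split <;> omega

lemma missing_le (graph : List (List Int)) (m : PySem.Dict Int Bool) :
    missing graph m ≤ 2 * graph.length := by
  have h := List.countP_le_length (l := Kset graph) (p := fun k => (PySem.Dict.get? m k).isNone)
  have hl : (Kset graph).length = 2 * graph.length := by
    unfold Kset
    rw [PySem.List.length_pyRange_one]
    omega
  unfold missing
  omega

lemma missing_mono {graph : List (List Int)} {m m' : PySem.Dict Int Bool}
    (h : ∀ j, (PySem.Dict.get? m j).isSome → (PySem.Dict.get? m' j).isSome) :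
    missing graph m' ≤ missing graph m := by
  unfold missing
  refine List.countP_mono_left (fun k _ hk => ?_)
  simp only [Option.isNone_iff_eq_none] at hk ⊢
  by_contra hc
  have : (PySem.Dict.get? m' k).isSome := h k (by simp [Option.isSome_iff_ne_none, hc])
  rw [hk] at this
  cases this

lemma missing_insert {graph : List (List Int)} {m : PySem.Dict Int Bool} {i : Int} (v : Bool)
    (h1 : -(graph.length : Int) ≤ i) (h2 : i < graph.length)
    (h : PySem.Dict.get? m i = none) :
    missing graph (PySem.Dict.insert m i v) < missing graph m := by
  unfold missing
  refine countP_lt_of (fun k _ hk => ?_) (a0 := i) ?_ ?_ ?_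
  · simp only [Option.isNone_iff_eq_none, PySem.Dict.get?_insert] at hk ⊢
    split at hk
    · cases hk
    · exact hk
  · unfold Kset
    rw [PySem.List.mem_pyRange_one]
    exact ⟨h1, h2⟩
  · simp
  · simp only [h, Option.isNone_none]

-- a `none` result (the IndexError path: the scan reached an out-of-range neighbour, or fuel
-- ran out — impossible while `missing` stays below it) only happens at nodes that are unsafe
lemma dfsA_none (graph : List (List Int)) : ∀ fuel : Nat,
    ∀ (i : Int) (m : PySem.Dict Int Bool), missing graph m < fuel →
    dfsA graph fuel i m = none → ¬ SafeP graph i := by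
  intro fuel
  induction fuel with
  | zero =>
    intro i m h3 _
    exact absurd h3 (Nat.not_lt_zero _)
  | succ fuel IH =>
    have loop : ∀ (row : List Int) (i : Int) (m : PySem.Dict Int Bool),
        missing graph m < fuel → dfsALoop graph fuel i row m = none →
        ∃ nei ∈ row, ¬ SafeP graph nei := by
      intro row
      induction row with
      | nil =>
        intro i m _ heq
        rw [dfsALoop] at heq
        cases heq
      | cons nei rest IHr =>
        intro i m hmiss heq
        rw [dfsALoop] at heq
        cases hd : dfsA graph fuel nei m with
        | none => exact ⟨nei, List.mem_cons_self, IH nei m hmiss hd⟩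
        | some r0 =>
          obtain ⟨b0, m0⟩ := r0
          rw [hd] at heq
          cases b0 with
          | true =>
            simp only [if_true] at heq
            have hmono := dfsA_dom_mono graph fuel nei m (true, m0) hd
            have hmiss0 : missing graph m0 < fuel := lt_of_le_of_lt (missing_mono hmono) hmiss
            obtain ⟨nei', hmem', hns'⟩ := IHr i m0 hmiss0 heq
            exact ⟨nei', List.mem_cons_of_mem _ hmem', hns'⟩
          | false =>
            simp only [Bool.false_eq_true, if_false] at heq
            cases heq
    intro i m hmiss heq
    rw [dfsA] at heq
    cases hm : PySem.Dict.get? m i with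
    | some bi =>
      rw [hm] at heq
      cases heq
    | none =>
      rw [hm] at heq
      cases hg : PySem.List.pyGet? graph i with
      | none =>
        intro hs
        obtain ⟨_, row, h, _⟩ := hs
        rw [hg] at h
        cases h
      | some row =>
        rw [hg] at heq
        have hrange : -(graph.length : Int) ≤ i ∧ i < graph.length := by
          by_contra hr
          have hnone : PySem.List.pyGet? graph i = none := by
            rw [PySem.List.pyGet?_eq_none_iff]
            simp only [PySem.Raise.InRange]
            omega
          rw [hnone] at hg
          cases hg
        have hmiss1 : missing graph (PySem.Dict.insert m i false) < fuel := by
          have := missing_insert false hrange.1 hrange.2 hm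
          omega
        obtain ⟨nei, hmem, hns⟩ := loop row i (PySem.Dict.insert m i false) hmiss1 heq
        exact fun hs => hns ((safeP_iff hg).mp hs nei hmem)

-- B-side: wrapped indexing
def wIdx (n : Nat) (j : Int) : Nat := if 0 ≤ j then j.toNat else (j + n).toNat

lemma wIdx_lt {n : Nat} {j : Int} (h1 : -(n : Int) ≤ j) (h2 : j < n) : wIdx n j < n := by
  unfold wIdx; split <;> omega

lemma wIdx_natCast (n k : Nat) : wIdx n (k : Int) = k := by
  unfold wIdx
  rw [if_pos (Int.natCast_nonneg _)]
  simp

lemma pyGet?_wIdx {α : Type} (F : List α) {j : Int}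
    (h1 : -(F.length : Int) ≤ j) (h2 : j < F.length) :
    PySem.List.pyGet? F j = F[wIdx F.length j]? := by
  by_cases hj : 0 ≤ j
  · rw [PySem.List.pyGet?_of_nonneg _ hj]
    unfold wIdx
    rw [if_pos hj]
  · have e1 : PySem.List.pyGet? F j = F[F.length - (-j).toNat]? := by
      conv_lhs => rw [show j = -(((-j).toNat : Nat) : Int) by omega]
      exact PySem.List.pyGet?_neg_natCast F (-j).toNat (by omega) (by omega)
    rw [e1]
    unfold wIdx
    rw [if_neg hj]
    congr 1
    omega

lemma pyGetD_wIdx {α : Type} (F : List α) {j : Int} (d : α)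
    (h1 : -(F.length : Int) ≤ j) (h2 : j < F.length) :
    PySem.List.pyGetD F j d = F.getD (wIdx F.length j) d := by
  have e : PySem.List.pyGetD F j d = (PySem.List.pyGet? F j).getD d := rfl
  rw [e, pyGet?_wIdx F h1 h2, List.getD_eq_getElem?_getD]

lemma pyGetD_true_range {F : List Bool} {j : Int} (h : PySem.List.pyGetD F j false = true) :
    -(F.length : Int) ≤ j ∧ j < F.length := by
  by_cases hr : -(F.length : Int) ≤ j ∧ j < F.length
  · exact hr
  · exfalso
    have hn : PySem.List.pyGet? F j = none := by
      rw [PySem.List.pyGet?_eq_none_iff]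
      simp only [PySem.Raise.InRange]
      omega
    rw [PySem.List.pyGetD_of_none F j false hn] at h
    cases h

def GoodF (graph : List (List Int)) (F : List Bool) : Prop :=
  ∀ j : Int, PySem.List.pyGetD F j false = true → SafeP graph j

def ClosedF (graph : List (List Int)) (F : List Bool) : Prop :=
  ∀ i : Int, 0 ≤ i → i < graph.length → PySem.List.pyGetD F i false = false →
    ∃ nei ∈ PySem.List.pyGetD graph i ([] : List Int), PySem.List.pyGetD F nei false = false

def tc (F : List Bool) : Nat := F.countP (fun b => b)

lemma closed_complete {graph : List (List Int)} {F : List Bool}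
    (hlen : F.length = graph.length) (hc : ClosedF graph F) :
    ∀ j : Int, SafeP graph j → PySem.List.pyGetD F j false = true := by
  intro j hs
  induction hs with
  | mk j row h ih IH =>
    by_contra hF
    rw [Bool.not_eq_true] at hF
    have hrange : -(graph.length : Int) ≤ j ∧ j < graph.length := by
      by_contra hr
      have hnone : PySem.List.pyGet? graph j = none := by
        rw [PySem.List.pyGet?_eq_none_iff]
        simp only [PySem.Raise.InRange]
        omega
      rw [hnone] at h
      cases h
    have hw := wIdx_lt (n := graph.length) hrange.1 hrange.2
    have h0i : (0 : Int) ≤ ((wIdx graph.length j : Nat) : Int) := Int.natCast_nonneg _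
    have hni : ((wIdx graph.length j : Nat) : Int) < graph.length := by exact_mod_cast hw
    have hFi : PySem.List.pyGetD F ((wIdx graph.length j : Nat) : Int) false = false := by
      rw [pyGetD_wIdx F false (by omega) (by omega), wIdx_natCast]
      rw [pyGetD_wIdx F false (by omega) (by omega), hlen] at hF
      exact hF
    obtain ⟨nei, hmem, hneif⟩ := hc _ h0i hni hFi
    have hrowi : PySem.List.pyGetD graph ((wIdx graph.length j : Nat) : Int) ([] : List Int) = row := by
      have e1 : PySem.List.pyGetD graph ((wIdx graph.length j : Nat) : Int) ([] : List Int)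
          = graph.getD (wIdx graph.length j) [] := by
        rw [pyGetD_wIdx graph ([] : List Int) (by omega) (by omega), wIdx_natCast]
      have e2 : PySem.List.pyGet? graph j = graph[wIdx graph.length j]? :=
        pyGet?_wIdx graph hrange.1 hrange.2
      rw [h] at e2
      rw [e1, List.getD_eq_getElem?_getD, ← e2]
      rfl
    rw [hrowi] at hmem
    rw [IH nei hmem] at hneif
    cases hneif

lemma stepB_len (graph : List (List Int)) (st : List Bool × Bool) (i : Int) :
    ((stepB graph st i).1).length = st.1.length := by
  unfold stepB
  split
  · exact PySem.List.length_pySetD _ _ _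
  · rfl

lemma foldB_len (graph : List (List Int)) : ∀ (L : List Int) (st : List Bool × Bool),
    ((L.foldl (stepB graph) st).1).length = st.1.length := by
  intro L
  induction L with
  | nil => intro st; rfl
  | cons i L IH =>
    intro st
    rw [List.foldl_cons, IH]
    exact stepB_len graph st i

lemma foldB_flag (graph : List (List Int)) : ∀ (L : List Int) (st : List Bool × Bool),
    st.2 = true → (L.foldl (stepB graph) st).2 = true := by
  intro L
  induction L with
  | nil => intro st h; exact h
  | cons i L IH =>
    intro st h
    rw [List.foldl_cons]
    refine IH _ ?_
    unfold stepB
    split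
    · rfl
    · exact h

lemma foldB_unchanged (graph : List (List Int)) : ∀ (L : List Int) (st : List Bool × Bool),
    (L.foldl (stepB graph) st).2 = false →
    (L.foldl (stepB graph) st).1 = st.1 ∧
      ∀ i ∈ L, (!(PySem.List.pyGetD st.1 i false)
        && (PySem.List.pyGetD graph i []).all (fun nei => PySem.List.pyGetD st.1 nei false)) = false := by
  intro L
  induction L with
  | nil => intro st _; exact ⟨rfl, by intro i hi; cases hi⟩
  | cons i L IH =>
    intro st hres
    rw [List.foldl_cons] at hres
    by_cases hc : (!(PySem.List.pyGetD st.1 i false)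
        && (PySem.List.pyGetD graph i []).all (fun nei => PySem.List.pyGetD st.1 nei false)) = true
    · exfalso
      have h2 : (stepB graph st i).2 = true := by unfold stepB; rw [if_pos hc]
      have := foldB_flag graph L _ h2
      rw [hres] at this
      cases this
    · have hstep : stepB graph st i = st := by unfold stepB; rw [if_neg hc]
      rw [hstep] at hres
      obtain ⟨h1, h2⟩ := IH st hres
      rw [List.foldl_cons, hstep]
      refine ⟨h1, ?_⟩
      intro i' hi'
      rcases List.mem_cons.mp hi' with rfl | hi'
      · simp only [Bool.not_eq_true] at hc
        exact hc
      · exact h2 i' hi'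

lemma foldB_good (graph : List (List Int)) : ∀ (L : List Int) (st : List Bool × Bool),
    (∀ i ∈ L, 0 ≤ i ∧ i < (graph.length : Int)) → st.1.length = graph.length →
    GoodF graph st.1 → GoodF graph (L.foldl (stepB graph) st).1 := by
  intro L
  induction L with
  | nil => intro st _ _ hg; exact hg
  | cons i L IH =>
    intro st hmem hlen hg
    rw [List.foldl_cons]
    refine IH _ (fun i' hi' => hmem i' (List.mem_cons_of_mem _ hi')) (by rw [stepB_len]; exact hlen) ?_
    by_cases hc : (!(PySem.List.pyGetD st.1 i false)
        && (PySem.List.pyGetD graph i []).all (fun nei => PySem.List.pyGetD st.1 nei false)) = true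
    · obtain ⟨h0i, hni⟩ := hmem i List.mem_cons_self
      rw [Bool.and_eq_true, Bool.not_eq_eq_eq_not, Bool.not_true] at hc
      obtain ⟨ha, hb⟩ := hc
      have hrowall : ∀ nei ∈ PySem.List.pyGetD graph i ([] : List Int),
          PySem.List.pyGetD st.1 nei false = true := by
        intro nei hnei
        exact (List.all_eq_true.mp hb) nei hnei
      have hwi : wIdx graph.length i = i.toNat := by unfold wIdx; rw [if_pos h0i]
      have hwilt : wIdx graph.length i < graph.length := wIdx_lt (by omega) hni
      have hgi : PySem.List.pyGet? graph i = some (PySem.List.pyGetD graph i ([] : List Int)) := by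
        rw [pyGet?_wIdx graph (by omega) hni, pyGetD_wIdx graph ([] : List Int) (by omega) hni]
        rw [List.getElem?_eq_getElem hwilt, List.getD_eq_getElem?_getD, List.getElem?_eq_getElem hwilt]
        rfl
      have hsafei : SafeP graph i := .mk i _ hgi (fun j hj => hg j (hrowall j hj))
      have hset : (stepB graph st i).1 = st.1.set i.toNat true := by
        unfold stepB
        rw [if_pos (by rw [Bool.and_eq_true, Bool.not_eq_eq_eq_not, Bool.not_true]; exact ⟨ha, hb⟩)]
        exact PySem.List.pySetD_of_nonneg _ _ h0i
      rw [hset]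
      intro j hj
      have hlset : (st.1.set i.toNat true).length = st.1.length := by simp
      have hrange := pyGetD_true_range hj
      rw [hlset] at hrange
      rw [pyGetD_wIdx _ false (by rw [hlset]; exact hrange.1) (by rw [hlset]; exact hrange.2),
        hlset] at hj
      by_cases hw : wIdx st.1.length j = i.toNat
      · have hrj : PySem.List.pyGet? graph j = some (PySem.List.pyGetD graph i ([] : List Int)) := by
          rw [pyGet?_wIdx graph (by rw [hlen] at hrange; exact_mod_cast hrange.1) (by rw [hlen] at hrange; exact_mod_cast hrange.2)]
          rw [← hgi, pyGet?_wIdx graph (by omega) hni]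
          congr 1
          rw [hwi, ← hlen]
          exact hw
        exact .mk j _ hrj (fun j' hj' => hg j' (hrowall j' hj'))
      · rw [List.getD_eq_getElem?_getD, List.getElem?_set_ne (by omega)] at hj
        rw [← List.getD_eq_getElem?_getD] at hj
        rw [← pyGetD_wIdx _ false hrange.1 hrange.2] at hj
        exact hg j hj
    · have hstep : stepB graph st i = st := by unfold stepB; rw [if_neg hc]
      rw [hstep]
      exact hg

lemma tc_set : ∀ (F : List Bool) (k : Nat), F[k]? = some false → tc (F.set k true) = tc F + 1 := by
  intro F
  induction F with
  | nil => intro k h; simp at h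
  | cons a F IH =>
    intro k h
    cases k with
    | zero =>
      simp only [List.getElem?_cons_zero, Option.some_inj] at h
      subst h
      simp [tc]
    | succ k =>
      simp only [List.getElem?_cons_succ] at h
      have hIH := IH k h
      unfold tc at hIH ⊢
      simp only [List.set_cons_succ, List.countP_cons]
      omega

lemma foldB_tc (graph : List (List Int)) : ∀ (L : List Int) (st : List Bool × Bool),
    (∀ i ∈ L, 0 ≤ i ∧ i < (graph.length : Int)) → st.1.length = graph.length →
    tc st.1 ≤ tc (L.foldl (stepB graph) st).1 ∧
      ((L.foldl (stepB graph) st).2 = true → st.2 = true ∨ tc st.1 < tc (L.foldl (stepB graph) st).1) := by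
  intro L
  induction L with
  | nil => intro st _ _; exact ⟨le_refl _, fun h => Or.inl h⟩
  | cons i L IH =>
    intro st hmem hlen
    rw [List.foldl_cons]
    have hIH := IH (stepB graph st i) (fun i' hi' => hmem i' (List.mem_cons_of_mem _ hi'))
      (by rw [stepB_len]; exact hlen)
    by_cases hc : (!(PySem.List.pyGetD st.1 i false)
        && (PySem.List.pyGetD graph i []).all (fun nei => PySem.List.pyGetD st.1 nei false)) = true
    · obtain ⟨h0i, hni⟩ := hmem i List.mem_cons_self
      rw [Bool.and_eq_true, Bool.not_eq_eq_eq_not, Bool.not_true] at hc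
      obtain ⟨ha, hb⟩ := hc
      have hwi : wIdx st.1.length i = i.toNat := by unfold wIdx; rw [if_pos h0i]
      have hwilt : i.toNat < st.1.length := by rw [hlen]; omega
      have hfalse : st.1[i.toNat]? = some false := by
        rw [pyGetD_wIdx _ false (by omega) (by rw [hlen]; exact hni), hwi,
          List.getD_eq_getElem?_getD, List.getElem?_eq_getElem hwilt] at ha
        rw [List.getElem?_eq_getElem hwilt]
        simp only [Option.getD_some] at ha
        rw [ha]
      have hset : (stepB graph st i).1 = st.1.set i.toNat true := by
        unfold stepB
        rw [if_pos (by rw [Bool.and_eq_true, Bool.not_eq_eq_eq_not, Bool.not_true]; exact ⟨ha, hb⟩)]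
        exact PySem.List.pySetD_of_nonneg _ _ h0i
      have htc : tc (stepB graph st i).1 = tc st.1 + 1 := by rw [hset]; exact tc_set _ _ hfalse
      refine ⟨by omega, fun _ => ?_⟩
      by_cases hst : st.2 = true
      · exact Or.inl hst
      · exact Or.inr (by omega)
    · have hstep : stepB graph st i = st := by unfold stepB; rw [if_neg hc]
      rw [hstep] at hIH ⊢
      exact hIH

lemma passesB_char (graph : List (List Int)) : ∀ (k : Nat) (F : List Bool),
    F.length = graph.length → GoodF graph F → graph.length ≤ tc F + k →
    (passesB graph k F).length = graph.length ∧ GoodF graph (passesB graph k F) ∧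
      ClosedF graph (passesB graph k F) := by
  intro k
  induction k with
  | zero =>
    intro F hlen hg hcount
    have htcle : tc F ≤ F.length := List.countP_le_length
    have hall : ∀ b ∈ F, b = true := by
      have he : F.countP (fun b => b) = F.length := by unfold tc at htcle hcount; omega
      have := List.countP_eq_length.mp he
      intro b hb
      exact this b hb
    refine ⟨hlen, hg, ?_⟩
    intro i h0 hn hF
    have hT : PySem.List.pyGetD (passesB graph 0 F) i false = true := by
      show PySem.List.pyGetD F i false = true
      have hwlt : wIdx F.length i < F.length := wIdx_lt (by omega) (by omega)
      rw [pyGetD_wIdx F false (by omega) (by omega)]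
      rw [List.getD_eq_getElem?_getD, List.getElem?_eq_getElem hwlt]
      exact hall _ (List.getElem_mem _)
    rw [hT] at hF
    cases hF
  | succ k IH =>
    intro F hlen hg hcount
    have hmemr : ∀ i ∈ PySem.List.pyRange 0 (graph.length : Int) 1, 0 ≤ i ∧ i < (graph.length : Int) :=
      fun i hi => PySem.List.mem_pyRange_one.mp hi
    have hlenp : (passB graph F).1.length = graph.length := by
      unfold passB; rw [foldB_len]; exact hlen
    have hgood : GoodF graph (passB graph F).1 := by
      unfold passB; exact foldB_good graph _ _ hmemr hlen hg
    rw [passesB]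
    by_cases hch : (passB graph F).2 = true
    · simp only [hch, if_true]
      have htc := foldB_tc graph (PySem.List.pyRange 0 (graph.length : Int) 1) (F, false) hmemr hlen
      have hlt : tc F < tc (passB graph F).1 := by
        rcases htc.2 (by unfold passB at hch; exact hch) with h | h
        · cases h
        · unfold passB
          exact h
      exact IH (passB graph F).1 hlenp hgood (by omega)
    · have hch' : (passB graph F).2 = false := by
        rw [Bool.not_eq_true] at hch; exact hch
      obtain ⟨hunch, hguard⟩ := foldB_unchanged graph _ _ (by unfold passB at hch'; exact hch')
      simp only [hch', Bool.false_eq_true, if_false]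
      have hres : (passB graph F).1 = F := by unfold passB; exact hunch
      rw [hres]
      refine ⟨hlen, hg, ?_⟩
      intro i h0 hn hF
      have hgi := hguard i (PySem.List.mem_pyRange_one.mpr ⟨h0, hn⟩)
      rw [hF] at hgi
      simp only [Bool.not_false, Bool.true_and] at hgi
      rw [List.all_eq_false] at hgi
      obtain ⟨nei, hmem, hne⟩ := hgi
      exact ⟨nei, hmem, by rw [Bool.not_eq_true] at hne; exact hne⟩

lemma fstar_char (graph : List (List Int)) :
    ∀ j : Int,
      PySem.List.pyGetD (passesB graph graph.length (List.replicate graph.length false)) j false = true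
        ↔ SafeP graph j := by
  have hrep : ∀ jj : Int, PySem.List.pyGetD (List.replicate graph.length false) jj false = false := by
    intro jj
    cases hq : PySem.List.pyGet? (List.replicate graph.length false) jj with
    | none => exact PySem.List.pyGetD_of_none _ _ _ hq
    | some x =>
      have hx : x ∈ List.replicate graph.length false := PySem.List.mem_of_pyGet?_eq_some _ hq
      have hxf : x = false := List.eq_of_mem_replicate hx
      show (PySem.List.pyGet? (List.replicate graph.length false) jj).getD false = false
      rw [hq, hxf]
      rfl
  have htc0 : tc (List.replicate graph.length false) = 0 := by
    unfold tc
    rw [List.countP_eq_zero]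
    intro b hb
    rw [List.eq_of_mem_replicate hb]
    simp
  obtain ⟨hlen, hg, hcl⟩ := passesB_char graph graph.length (List.replicate graph.length false)
    (by simp) (fun j hj => absurd (hrep j) (by rw [hj]; simp)) (by omega)
  intro j
  exact ⟨fun h => hg j h, fun hs => closed_complete hlen hcl j hs⟩

lemma foldA_eq (graph : List (List Int)) :
    ∀ (L : List Int) (m : PySem.Dict Int Bool) (res : List Int),
    (∀ i ∈ L, 0 ≤ i ∧ i < (graph.length : Int)) → InvM graph m [] →
    (L.foldl (stepA graph) (m, res)).2 =
      res ++ L.filter (fun i =>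
        PySem.List.pyGetD (passesB graph graph.length (List.replicate graph.length false)) i false) := by
  intro L
  induction L with
  | nil => intro m res _ _; simp
  | cons i L IHL =>
    intro m res hmem hInv
    obtain ⟨h0, hn⟩ := hmem i List.mem_cons_self
    cases hr : dfsA graph (2 * graph.length + 1) i m with
    | none =>
      have hns : ¬ SafeP graph i :=
        dfsA_none graph _ i m (by have := missing_le graph m; omega) hr
      have hb : PySem.List.pyGetD (passesB graph graph.length (List.replicate graph.length false)) i false = false := by
        cases hq : PySem.List.pyGetD (passesB graph graph.length (List.replicate graph.length false)) i false with
        | true => exact absurd ((fstar_char graph i).mp hq) hns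
        | false => rfl
      have hstep : stepA graph (m, res) i = (m, res) := by
        unfold stepA
        rw [hr]
      rw [List.foldl_cons, hstep, List.filter_cons, hb]
      simp only [Bool.false_eq_true, if_false]
      exact IHL m res (fun i' hi' => hmem i' (List.mem_cons_of_mem _ hi')) hInv
    | some r =>
      obtain ⟨b, m'⟩ := r
      obtain ⟨_, hInv', _, hbt, hbf⟩ := dfsA_sound graph _ i m [] b m'
        (by intro j hj; cases hj) hInv (by intro j hj; cases hj) hr
      have hb : PySem.List.pyGetD (passesB graph graph.length (List.replicate graph.length false)) i false = b := by
        cases b with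
        | true => exact (fstar_char graph i).mpr (hbt rfl)
        | false =>
          rcases hbf rfl with h | h
          · cases h
          · cases hq : PySem.List.pyGetD (passesB graph graph.length (List.replicate graph.length false)) i false with
            | true => exact absurd ((fstar_char graph i).mp hq) h
            | false => rfl
      have hstep : stepA graph (m, res) i = (m', if b then res ++ [i] else res) := by
        unfold stepA
        rw [hr]
      rw [List.foldl_cons, hstep, List.filter_cons, hb]
      cases b with
      | true =>
        simp only [if_true]
        rw [IHL m' (res ++ [i]) (fun i' hi' => hmem i' (List.mem_cons_of_mem _ hi')) hInv']
        simp
      | false =>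
        simp only [Bool.false_eq_true, if_false]
        exact IHL m' res (fun i' hi' => hmem i' (List.mem_cons_of_mem _ hi')) hInv'

-- ===== VERDICT (by name: the statement is the Claim_ definition above) =====
-- the port-level equality in fact holds on every input (the IndexError path of A's port
-- treats the offending node as unsafe, exactly as B does), so Pre_ is not needed by the proof
theorem safeState_spec : Claim_equal_safeState := by
  intro graph _ _
  unfold Spec_safeState safeState safeState_alt
  have h := foldA_eq graph (PySem.List.pyRange 0 (graph.length : Int) 1) PySem.Dict.empty []
    (fun i hi => by
      have := (PySem.List.mem_pyRange_one).mp hi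
      exact ⟨this.1, this.2⟩)
    (by intro j b hb; rw [PySem.Dict.get?_empty] at hb; cases hb)
  simpa using h
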